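-- pv_equiv track=rewrite | github.com/MrBrantCode/unitest_baseline | mut_generate/mist_train_cf/cf_87885/solution.py | get_combinations
-- ===== SOURCE A (Python) =====
-- from collections import Counter
--
-- def get_combinations(string, n):
--     counter = Counter(string)
--     unique_chars = sorted(set(string))
--     combinations = []
--
--     def backtrack(current_combination, remaining_chars, remaining_length):
--         if remaining_length == 0:
--             combinations.append("".join(current_combination))
--             return
--
--         for char in remaining_chars:
--             if counter[char] == 0:
--                 continue
--             current_combination.append(char)
--             counter[char] -= 1
--             backtrack(current_combination, remaining_chars, remaining_length - 1)
--             current_combination.pop()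
--             counter[char] += 1
--
--     backtrack([], unique_chars, n)
--     return combinations
-- ===== SOURCE B (Python) =====
-- from collections import Counter
--
-- def get_combinations(string, n):
--     if n < 0:
--         return []
--     chars = sorted(set(string))
--     work = [([], Counter(string))]
--     for _ in range(n):
--         if not work:
--             break
--         new_work = []
--         for prefix, cnt in work:
--             for ch in chars:
--                 if cnt[ch]:
--                     c2 = cnt.copy()
--                     c2[ch] -= 1
--                     new_work.append((prefix + [ch], c2))
--         work = new_work
--     return ["".join(p) for p, _ in work]
-- ===== Notes on version B (the rewrite author's own statement) =====
-- stated objective: alternative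
-- what changed: Replaces A's recursive DFS backtracking (shared mutated counter, append/pop restore) with an iterative level-wise worklist expansion: n rounds, each extending every (prefix, counter) pair by each still-available char in sorted order.
import Mathlib
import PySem

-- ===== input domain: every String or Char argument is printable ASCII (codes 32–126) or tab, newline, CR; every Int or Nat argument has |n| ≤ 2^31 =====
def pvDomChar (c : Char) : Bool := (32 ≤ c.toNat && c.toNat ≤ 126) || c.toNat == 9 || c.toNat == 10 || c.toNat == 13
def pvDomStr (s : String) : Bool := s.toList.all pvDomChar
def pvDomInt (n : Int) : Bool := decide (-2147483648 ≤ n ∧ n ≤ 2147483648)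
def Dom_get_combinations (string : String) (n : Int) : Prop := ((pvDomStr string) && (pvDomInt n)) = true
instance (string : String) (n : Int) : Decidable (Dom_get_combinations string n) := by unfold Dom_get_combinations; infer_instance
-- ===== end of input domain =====

-- B replaces A's recursive backtracking by an iterative level-wise worklist expansion (same return value; A mutates nothing observable).

-- ===== PORT A =====
-- backtrack(current_combination, remaining_chars, remaining_length): the Python recursion, with the
-- mutated-and-restored Counter threaded functionally (each loop iteration sees the restored counter)
-- and a fuel argument that only makes the recursion structurally total (it is never exhausted:
-- the recursion depth is bounded by n.toNat + |string| + 1).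
def pvBacktrack (chars : List Char) : Nat → PySem.Dict Char Int → List Char → Int → List String → List String
  | 0, _, _, _, combs => combs
  | fuel + 1, counter, cur, len, combs =>
    if len = 0 then combs ++ [String.ofList cur]
    else chars.foldl (fun acc ch =>
      if counter.getD ch 0 = 0 then acc
      else pvBacktrack chars fuel (counter.insert ch (counter.getD ch 0 - 1)) (cur ++ [ch]) (len - 1) acc) combs

def get_combinations (string : String) (n : Int) : List String :=
  let counter := PySem.Dict.counter string.toList
  let unique_chars := PySem.List.sorted (PySem.Set.ofList string.toList) (fun c => c) false
  pvBacktrack unique_chars (n.toNat + string.toList.length + 1) counter [] n []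

-- ===== PORT B =====
-- one expansion round: extend every (prefix, counter) of the worklist by each available char
def pvStep (chars : List Char) (work : List (List Char × PySem.Dict Char Int)) :
    List (List Char × PySem.Dict Char Int) :=
  work.foldl (fun nw st =>
    chars.foldl (fun nw ch =>
      if st.2.getD ch 0 = 0 then nw
      else nw ++ [(st.1 ++ [ch], st.2.insert ch (st.2.getD ch 0 - 1))]) nw) []

def pvRounds (chars : List Char) : Nat → List (List Char × PySem.Dict Char Int) → List (List Char × PySem.Dict Char Int)
  | 0, work => work
  | k + 1, work => if work = [] then work else pvRounds chars k (pvStep chars work)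

def get_combinations_alt (string : String) (n : Int) : List String :=
  if n < 0 then []
  else
    let chars := PySem.List.sorted (PySem.Set.ofList string.toList) (fun c => c) false
    let work := pvRounds chars n.toNat [([], PySem.Dict.counter string.toList)]
    work.map (fun st => String.ofList st.1)

-- ===== PRECONDITION & SPEC =====
def Spec_get_combinations (string : String) (n : Int) (out : List String) : Prop := out = get_combinations_alt string n
instance (string : String) (n : Int) (out : List String) : Decidable (Spec_get_combinations string n out) := by unfold Spec_get_combinations; infer_instance

-- ===== CLAIM (what is proved, stated in full; the proofs are below) =====
def Claim_equal_get_combinations : Prop := ∀ (string : String) (n : Int), Dom_get_combinations string n → Spec_get_combinations string n (get_combinations string n)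

-- ===== LEMMAS AND PROOFS =====

-- generic loop shapes for the two ports' conditional-append folds
lemma pvFoldl_if_app {α β : Type} (P : α → Prop) [DecidablePred P] (g : α → List β) :
    ∀ (l : List α) (acc : List β),
    l.foldl (fun acc ch => if P ch then acc else acc ++ g ch) acc
      = acc ++ l.flatMap (fun ch => if P ch then [] else g ch) := by
  intro l
  induction l with
  | nil => intro acc; simp
  | cons x t ih =>
    intro acc
    simp only [List.foldl_cons, List.flatMap_cons]
    split_ifs with h <;> simp [ih, List.append_assoc]

lemma pvFilterMap_flatMap {α β γ : Type} (P : α → Prop) [DecidablePred P] (e : α → β) (h : β → List γ) :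
    ∀ (l : List α),
    (l.filterMap (fun ch => if P ch then none else some (e ch))).flatMap h
      = l.flatMap (fun ch => if P ch then [] else h (e ch)) := by
  intro l
  induction l with
  | nil => rfl
  | cons x t ih =>
    simp only [List.filterMap_cons, List.flatMap_cons]
    split_ifs with hx <;> simp [ih]

-- A with negative remaining_length never appends: remaining_length only decreases, so it is never 0.
lemma pvBacktrack_neg (chars : List Char) (fuel : Nat) :
    ∀ (counter : PySem.Dict Char Int) (cur : List Char) (len : Int) (combs : List String),
    len < 0 → pvBacktrack chars fuel counter cur len combs = combs := by
  induction fuel with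
  | zero => intro c cur len combs _; rfl
  | succ f ih =>
    intro c cur len combs h
    simp only [pvBacktrack]
    rw [if_neg (by omega)]
    have hb : ∀ (l : List Char) (acc : List String),
        l.foldl (fun acc ch => if c.getD ch 0 = 0 then acc
          else pvBacktrack chars f (c.insert ch (c.getD ch 0 - 1)) (cur ++ [ch]) (len - 1) acc) acc = acc := by
      intro l
      induction l with
      | nil => intro acc; rfl
      | cons x t iht =>
        intro acc
        simp only [List.foldl_cons]
        split_ifs with hx
        · exact iht acc
        · rw [ih _ _ _ _ (by omega)]; exact iht acc
    exact hb chars combs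

def pvExt (chars : List Char) (st : List Char × PySem.Dict Char Int) :
    List (List Char × PySem.Dict Char Int) :=
  chars.filterMap (fun ch =>
    if st.2.getD ch 0 = 0 then none
    else some (st.1 ++ [ch], st.2.insert ch (st.2.getD ch 0 - 1)))

lemma pvStep_eq_flatMap (chars : List Char) (W : List (List Char × PySem.Dict Char Int)) :
    pvStep chars W = W.flatMap (pvExt chars) := by
  unfold pvStep
  have hbody : (fun (nw : List (List Char × PySem.Dict Char Int)) st =>
      chars.foldl (fun nw ch =>
        if st.2.getD ch 0 = 0 then nw
        else nw ++ [(st.1 ++ [ch], st.2.insert ch (st.2.getD ch 0 - 1))]) nw)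
      = (fun nw st => nw ++ pvExt chars st) := by
    funext nw st
    rw [pvFoldl_if_app (fun ch => st.2.getD ch 0 = 0)
      (fun ch => [(st.1 ++ [ch], st.2.insert ch (st.2.getD ch 0 - 1))]) chars nw]
    unfold pvExt
    congr 1
    induction chars with
    | nil => rfl
    | cons x t iht =>
      simp only [List.flatMap_cons, List.filterMap_cons]
      split_ifs with hx <;> simp [iht]
  rw [hbody]
  simpa using PySem.List.foldl_append_eq_flatMap (pvExt chars) W []

lemma pvRounds_nil (chars : List Char) (k : Nat) : pvRounds chars k [] = [] := by
  cases k with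
  | zero => rfl
  | succ m => simp [pvRounds]

-- the empty-worklist early exit is invisible to the recursion's value
lemma pvRounds_succ (chars : List Char) (k : Nat) (w : List (List Char × PySem.Dict Char Int)) :
    pvRounds chars (k + 1) w = pvRounds chars k (pvStep chars w) := by
  by_cases hw : w = []
  · subst hw
    rw [show pvStep chars [] = [] from rfl, pvRounds_nil, pvRounds_nil]
  · simp only [pvRounds, if_neg hw]

lemma pvRounds_append (chars : List Char) (k : Nat) :
    ∀ a b, pvRounds chars k (a ++ b) = pvRounds chars k a ++ pvRounds chars k b := by
  induction k with
  | zero => intro a b; rfl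
  | succ m ih =>
    intro a b
    rw [pvRounds_succ, pvRounds_succ, pvRounds_succ]
    rw [pvStep_eq_flatMap, List.flatMap_append, ih, ← pvStep_eq_flatMap, ← pvStep_eq_flatMap]

lemma pvRounds_flatMap (chars : List Char) (k : Nat) (W : List (List Char × PySem.Dict Char Int)) :
    pvRounds chars k W = W.flatMap (fun s => pvRounds chars k [s]) := by
  induction W with
  | nil => simpa using pvRounds_nil chars k
  | cons s t ih =>
    have : s :: t = [s] ++ t := rfl
    rw [this, pvRounds_append, ih]
    simp

lemma pvMain (chars : List Char) (k : Nat) :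
    ∀ (fuel : Nat) (counter : PySem.Dict Char Int) (cur : List Char) (combs : List String),
    k + 1 ≤ fuel →
    pvBacktrack chars fuel counter cur (k : Int) combs
      = combs ++ (pvRounds chars k [(cur, counter)]).map (fun st => String.ofList st.1) := by
  induction k with
  | zero =>
    intro fuel c cur combs h
    match fuel, h with
    | f + 1, _ =>
      simp only [pvBacktrack, pvRounds]
      rw [if_pos (by norm_num)]
      simp
  | succ k ih =>
    intro fuel c cur combs h
    match fuel, h with
    | f + 1, h =>
      simp only [pvBacktrack]
      rw [if_neg (by push_cast; omega)]
      have hlen : ((k + 1 : Nat) : Int) - 1 = (k : Int) := by push_cast; ring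
      rw [hlen]
      have hbody : (fun (acc : List String) ch =>
          if c.getD ch 0 = 0 then acc
          else pvBacktrack chars f (c.insert ch (c.getD ch 0 - 1)) (cur ++ [ch]) (k : Int) acc)
          = (fun acc ch => if c.getD ch 0 = 0 then acc
            else acc ++ (pvRounds chars k [(cur ++ [ch], c.insert ch (c.getD ch 0 - 1))]).map
              (fun st => String.ofList st.1)) := by
        funext acc ch
        split_ifs with hx
        · rfl
        · exact ih f _ _ _ (by omega)
      rw [hbody, pvFoldl_if_app (fun ch => c.getD ch 0 = 0)
        (fun ch => (pvRounds chars k [(cur ++ [ch], c.insert ch (c.getD ch 0 - 1))]).map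
          (fun st => String.ofList st.1)) chars combs]
      congr 1
      -- right-hand side: one BFS step, then k more rounds
      show _ = (pvRounds chars (k + 1) [(cur, c)]).map (fun st => String.ofList st.1)
      rw [pvRounds_succ, pvStep_eq_flatMap]
      simp only [List.flatMap_cons, List.flatMap_nil, List.append_nil]
      rw [pvRounds_flatMap, List.map_flatMap]
      show List.flatMap _ chars = List.flatMap _ (pvExt chars (cur, c))
      unfold pvExt
      rw [pvFilterMap_flatMap (fun ch => c.getD ch 0 = 0)
        (fun ch => (cur ++ [ch], c.insert ch (c.getD ch 0 - 1)))
        (fun s => (pvRounds chars k [s]).map (fun st => String.ofList st.1))]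

-- ===== VERDICT (by name: the statement is the Claim_ definition above) =====
theorem get_combinations_spec : Claim_equal_get_combinations := by
  intro string n _
  unfold Spec_get_combinations get_combinations get_combinations_alt
  by_cases hn : n < 0
  · simp only [hn, if_pos]
    exact pvBacktrack_neg _ _ _ _ _ _ hn
  · simp only [hn, if_neg, not_false_iff]
    have hcast : ((n.toNat : Int)) = n := Int.toNat_of_nonneg (by omega)
    rw [← hcast]
    exact pvMain _ n.toNat _ _ _ _ (by omega)
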